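-- pv_equiv track=rewrite | github.com/this-is-real/algorithm | hash/42578/이노아.py | solution
-- ===== SOURCE A (Python) =====
-- from collections import defaultdict
-- from math import prod
--
-- def solution(clothes):
--     answer = 1
--     dic = defaultdict(lambda:1) # int 로 하면 0..!
--
--     for v,k in clothes:
--         dic[k] += 1
--
-- # # 1번 for loop
-- #     for i in list(dic.values()):
-- #         answer *= i
--
-- #     return answer - 1
--
--
-- # 2번 math.prod() 활용
--     if len(dic.values()) == 1:
--         return list(dic.values())[0] - 1
--     else:
--         return prod(dic.values()) - 1
-- ===== SOURCE B (Python) =====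
-- def solution(clothes):
--     total, run, prev = 1, 0, None
--     for c in sorted(k for _, k in clothes):
--         if c != prev:
--             total *= run + 1
--             run, prev = 1, c
--         else:
--             run += 1
--     return total * (run + 1) - 1
-- ===== Notes on version B (the rewrite author's own statement) =====
-- stated objective: alternative
-- what changed: Replaces the defaultdict counting pass plus math.prod over the dict's values with a sort of the category list followed by a single run-length scan that multiplies the running product by (run length + 1) as each run closes.
import Mathlib
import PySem

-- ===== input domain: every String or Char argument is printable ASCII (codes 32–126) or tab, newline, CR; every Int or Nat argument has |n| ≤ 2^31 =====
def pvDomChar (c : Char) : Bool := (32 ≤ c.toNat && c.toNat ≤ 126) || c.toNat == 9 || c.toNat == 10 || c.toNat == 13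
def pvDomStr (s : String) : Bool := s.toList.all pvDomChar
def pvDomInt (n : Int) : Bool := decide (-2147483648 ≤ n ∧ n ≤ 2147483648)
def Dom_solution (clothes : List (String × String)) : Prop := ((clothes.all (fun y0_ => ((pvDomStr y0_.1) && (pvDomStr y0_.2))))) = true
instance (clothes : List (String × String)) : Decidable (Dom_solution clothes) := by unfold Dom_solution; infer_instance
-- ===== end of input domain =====

-- B replaces A's defaultdict counting + math.prod over the dict values by sorting the
-- category list and doing one run-length scan that multiplies (run length + 1) per run.

-- ===== PORT A =====
-- for v,k in clothes: dic[k] += 1   (defaultdict(lambda:1): absent key reads as 1)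
def solution (clothes : List (String × String)) : Int :=
  let dic : PySem.Dict String Int :=
    clothes.foldl (fun d p => d.insert p.2 (d.getD p.2 1 + 1)) PySem.Dict.empty
  if dic.values.length = 1 then
    -- list(dic.values())[0]: index 0 of a length-1 list, always present; getD 0 is never used
    ((PySem.List.pyGet? dic.values 0).getD 0) - 1
  else
    dic.values.prod - 1   -- math.prod(dic.values())

-- ===== PORT B =====
-- loop body of Source B: state (total, run, prev)
def bstep (st : Int × Int × Option String) (c : String) : Int × Int × Option String :=
  if some c ≠ st.2.2 then (st.1 * (st.2.1 + 1), 1, some c)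
  else (st.1, st.2.1 + 1, st.2.2)

def solution_alt (clothes : List (String × String)) : Int :=
  let s := (PySem.List.sorted (clothes.map (fun p => p.2)) (fun x => x) false).foldl bstep (1, 0, none)
  s.1 * (s.2.1 + 1) - 1

-- ===== PRECONDITION & SPEC =====
def Spec_solution (clothes : List (String × String)) (out : Int) : Prop := out = solution_alt clothes
instance (clothes : List (String × String)) (out : Int) : Decidable (Spec_solution clothes out) := by unfold Spec_solution; infer_instance

-- ===== CLAIM (what is proved, stated in full; the proofs are below) =====
def Claim_equal_solution : Prop := ∀ (clothes : List (String × String)), Dom_solution clothes → Spec_solution clothes (solution clothes)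

-- ===== LEMMAS AND PROOFS =====

-- A's dict after the loop: key k holds 1 + (#occurrences of k among the categories)
theorem getD_fold_one (l : List String) (d : PySem.Dict String Int) (v : String) :
    (l.foldl (fun d k => d.insert k (d.getD k 1 + 1)) d).getD v 1 = d.getD v 1 + l.count v := by
  induction l generalizing d with
  | nil => simp
  | cons c l ih =>
    simp only [List.foldl_cons, ih]
    rw [PySem.Dict.getD_insert]
    by_cases h : v = c
    · subst h; simp [List.count_cons_self]; ring
    · rw [if_neg h, List.count_cons_of_ne (fun e => h e.symm)]

theorem discard_cons_self {s : List String} {x : String} :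
    PySem.Set.discard (x :: s) x = PySem.Set.discard s x := by
  simp [PySem.Set.discard]

theorem discard_cons_ne {s : List String} {c x : String} (h : c ≠ x) :
    PySem.Set.discard (c :: s) x = c :: PySem.Set.discard s x := by
  simp [PySem.Set.discard, h]

theorem discard_of_not_mem {s : List String} {x : String} (h : x ∉ s) :
    PySem.Set.discard s x = s := by
  simp only [PySem.Set.discard]
  apply List.filter_eq_self.mpr
  intro a ha
  rw [show (!(a == x)) = (a != x) from rfl, bne_iff_ne]
  exact fun hax => h (hax ▸ ha)

-- counts over a cons are unchanged on a list avoiding the head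
theorem map_count_cons_ne (c : String) (l : List String) (S : List String)
    (hS : ∀ k ∈ S, k ≠ c) :
    S.map (fun k => (((c :: l).count k : Int) + 1)) = S.map (fun k => ((l.count k : Int) + 1)) :=
  List.map_congr_left (fun k hk => by rw [List.count_cons_of_ne (fun e => hS k hk e.symm)])

-- run-length invariant of B's loop on a sorted list, with an open run for p
theorem bfold_run (l : List String) (t r : Int) (p : String)
    (hs : l.Pairwise (· ≤ ·)) (hb : ∀ x ∈ l, p ≤ x) :
    (l.foldl bstep (t, r, some p)).1 * ((l.foldl bstep (t, r, some p)).2.1 + 1)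
      = t * (r + l.count p + 1)
        * ((PySem.Set.discard (PySem.Set.ofList l) p).map (fun k => ((l.count k : Int) + 1))).prod := by
  induction l generalizing t r p with
  | nil =>
    simp only [List.foldl_nil, List.count_nil, PySem.Set.ofList_nil, PySem.Set.discard,
      List.filter_nil, List.map_nil, List.prod_nil, Nat.cast_zero]
    ring
  | cons c l ih =>
    have hs' := hs.tail
    have hcl : ∀ x ∈ l, c ≤ x := fun x hx => List.rel_of_pairwise_cons hs hx
    by_cases hc : c = p
    · subst hc
      rw [List.foldl_cons, show bstep (t, r, some c) c = (t, r + 1, some c) by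
        simp only [bstep]; rw [if_neg (by simp)]]
      rw [ih t (r + 1) c hs' hcl]
      have hD : ∀ k ∈ PySem.Set.discard (PySem.Set.ofList l) c, k ≠ c :=
        fun k hk => ((PySem.Set.mem_discard _ _ _).mp hk).2
      rw [PySem.Set.ofList_cons, discard_cons_self,
        discard_of_not_mem (fun hm => (hD c hm) rfl),
        map_count_cons_ne c l _ hD, List.count_cons_self]
      push_cast; ring
    · have hpc : p < c := lt_of_le_of_ne (hb c (by simp)) (fun h => hc h.symm)
      have hpnl : p ∉ l := fun hm => absurd (hcl p hm) (not_le.mpr hpc)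
      have hpnotin : p ∉ c :: l := by
        intro hm; rcases List.mem_cons.mp hm with h | h
        · exact hc h.symm
        · exact hpnl h
      rw [List.foldl_cons, show bstep (t, r, some p) c = (t * (r + 1), 1, some c) by
        simp only [bstep]; rw [if_pos (by simp only [ne_eq, Option.some.injEq]; exact hc)]]
      rw [ih (t * (r + 1)) 1 c hs' hcl]
      have hD : ∀ k ∈ PySem.Set.discard (PySem.Set.ofList l) c, k ≠ c :=
        fun k hk => ((PySem.Set.mem_discard _ _ _).mp hk).2
      rw [List.count_eq_zero.mpr hpnotin]
      rw [PySem.Set.ofList_cons, discard_cons_ne hc,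
        discard_of_not_mem (fun hm =>
          hpnl ((PySem.Set.mem_ofList _ _).mp ((PySem.Set.mem_discard _ _ _).mp hm).1))]
      rw [List.map_cons, List.prod_cons, List.count_cons_self,
        map_count_cons_ne c l _ hD]
      push_cast; ring

-- B's loop from the initial state computes the product of (count+1) over the distinct values
theorem bfold_top (l : List String) (hs : l.Pairwise (· ≤ ·)) :
    (l.foldl bstep (1, 0, none)).1 * ((l.foldl bstep (1, 0, none)).2.1 + 1)
      = ((PySem.Set.ofList l).map (fun k => ((l.count k : Int) + 1))).prod := by
  cases l with
  | nil => simp [PySem.Set.ofList_nil]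
  | cons c l =>
    rw [List.foldl_cons, show bstep (1, 0, none) c = (1, 1, some c) by
      simp only [bstep]; rw [if_pos (by simp)]; norm_num]
    rw [bfold_run l 1 1 c hs.tail (fun x hx => List.rel_of_pairwise_cons hs hx)]
    have hD : ∀ k ∈ PySem.Set.discard (PySem.Set.ofList l) c, k ≠ c :=
      fun k hk => ((PySem.Set.mem_discard _ _ _).mp hk).2
    rw [PySem.Set.ofList_cons, List.map_cons, List.prod_cons, List.count_cons_self,
      map_count_cons_ne c l _ hD]
    push_cast; ring

-- A's final branch is prod - 1 in both arms
theorem branch_eq_prod (values : List Int) :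
    (if values.length = 1 then ((PySem.List.pyGet? values 0).getD 0) - 1 else values.prod - 1)
      = values.prod - 1 := by
  split_ifs with h
  · obtain ⟨v, rfl⟩ := List.length_eq_one_iff.mp h
    simp [PySem.List.pyGet?, PySem.List.pyIdx?]
  · rfl

-- ===== VERDICT (by name: the statement is the Claim_ definition above) =====
theorem solution_spec : Claim_equal_solution := by
  intro clothes _
  unfold Spec_solution solution solution_alt
  dsimp only
  set cats := clothes.map (fun p => p.2) with hcats
  set scats := PySem.List.sorted cats (fun x => x) false with hscats
  -- A's loop over the pairs is the same loop over the category list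
  rw [← List.foldl_map (f := fun p : String × String => p.2)
    (g := fun (d : PySem.Dict String Int) k => d.insert k (d.getD k 1 + 1))]
  set dic : PySem.Dict String Int := cats.foldl (fun d k => d.insert k (d.getD k 1 + 1)) PySem.Dict.empty with hdic
  have hkeys : dic.keys = PySem.Set.ofList cats := by
    rw [hdic, PySem.Dict.keys_foldl_insert_key cats (fun k => k) (fun d k => d.getD k 1 + 1)]
    simp [PySem.Dict.keys, PySem.Dict.empty, PySem.Set.update_nil_left]
  have hnodup : dic.keys.Nodup := hkeys ▸ PySem.Set.nodup_ofList cats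
  have hvals : dic.values = (PySem.Set.ofList cats).map (fun k => ((cats.count k : Int) + 1)) := by
    rw [PySem.Dict.values_eq_map_keys dic hnodup 1, hkeys]
    exact List.map_congr_left (fun k _ => by
      rw [hdic, getD_fold_one]
      simp [PySem.Dict.empty, PySem.Dict.getD, PySem.Dict.get?]
      ring)
  rw [branch_eq_prod, hvals]
  -- B side
  have hperm : scats.Perm cats := PySem.List.sorted_perm cats (fun x => x) false
  rw [bfold_top scats (PySem.List.sorted_pairwise cats (fun x => x))]
  have hcnt : ((PySem.Set.ofList scats).map (fun k => ((scats.count k : Int) + 1)))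
      = (PySem.Set.ofList scats).map (fun k => ((cats.count k : Int) + 1)) :=
    List.map_congr_left (fun k _ => by rw [hperm.count_eq])
  have hsetperm : (PySem.Set.ofList scats).Perm (PySem.Set.ofList cats) := by
    rw [List.perm_ext_iff_of_nodup (PySem.Set.nodup_ofList _) (PySem.Set.nodup_ofList _)]
    intro a
    rw [PySem.Set.mem_ofList, PySem.Set.mem_ofList, hperm.mem_iff]
  rw [hcnt, (hsetperm.map (fun k => ((cats.count k : Int) + 1))).prod_eq]
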